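-- pv_equiv track=rewrite | github.com/riczou/my-first-project | app/api/connections.py | _get_csv_value
-- ===== SOURCE A (Python) =====
-- def _get_csv_value(row, possible_keys):
--     """Get value from CSV row using multiple possible column names"""
--     for key in possible_keys:
--         # Try exact match first
--         if key in row and row[key]:
--             return row[key].strip()
--         # Try case-insensitive match
--         for actual_key in row.keys():
--             if actual_key.lower() == key.lower() and row[actual_key]:
--                 return row[actual_key].strip()
--     return None
-- ===== SOURCE B (Python) =====
-- def _get_csv_value(row, possible_keys):
--     """Get value from CSV row using multiple possible column names"""
--     # Priority table: exact match on possible_keys[i] scores 2*i, a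
--     # case-insensitive match scores 2*i+1; first occurrence of a key wins.
--     exact_pos = {}
--     ci_pos = {}
--     for i, key in enumerate(possible_keys):
--         exact_pos.setdefault(key, 2 * i)
--         ci_pos.setdefault(key.lower(), 2 * i + 1)
--     # Single pass over the row: keep the first entry with the lowest score.
--     best = None  # (score, stripped value)
--     for k, v in row.items():
--         if not v:
--             continue
--         p = exact_pos.get(k)
--         q = ci_pos.get(k.lower())
--         if p is None:
--             cand = q
--         elif q is None or p < q:
--             cand = p
--         else:
--             cand = q
--         if cand is not None and (best is None or cand < best[0]):
--             best = (cand, v.strip())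
--     return best[1] if best is not None else None
-- ===== Notes on version B (the rewrite author's own statement) =====
-- stated objective: alternative
-- what changed: B inverts the traversal: instead of A's key-major nested scans it precomputes a priority table over possible_keys (exact match at index i scores 2i, case-insensitive 2i+1) and finds the answer in a single row-major pass keeping the first minimum-priority entry.
import Mathlib
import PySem

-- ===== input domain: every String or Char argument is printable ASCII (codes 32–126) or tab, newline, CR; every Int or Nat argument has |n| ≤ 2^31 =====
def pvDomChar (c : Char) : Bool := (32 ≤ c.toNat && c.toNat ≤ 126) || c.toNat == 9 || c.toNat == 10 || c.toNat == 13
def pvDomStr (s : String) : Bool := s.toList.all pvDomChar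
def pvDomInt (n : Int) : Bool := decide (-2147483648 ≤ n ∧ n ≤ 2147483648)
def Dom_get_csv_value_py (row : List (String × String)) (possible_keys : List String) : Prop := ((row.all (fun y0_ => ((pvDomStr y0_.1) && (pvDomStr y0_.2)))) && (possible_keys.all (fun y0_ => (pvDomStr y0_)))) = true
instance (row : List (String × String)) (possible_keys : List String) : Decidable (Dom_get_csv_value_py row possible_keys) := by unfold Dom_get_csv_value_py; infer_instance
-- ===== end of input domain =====

-- B replaces A's nested key-major scans by a priority table over possible_keys plus one
-- row-major pass keeping the minimum-priority entry (alternative decomposition, same results).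


-- ===== PORT A =====
-- inner 'for actual_key in row.keys(): …' scan; row[actual_key] is the pair's value
-- (dict keys are unique), exact on the assoc-list image of a Python dict.
def pyAInner (row : List (String × String)) (kl : String) : Option String :=
  match row with
  | [] => none
  | (ak, av) :: t =>
    if PySem.Str.lower ak = kl ∧ av ≠ "" then some (PySem.Str.strip av)
    else pyAInner t kl

def get_csv_value_py (row : List (String × String)) (possible_keys : List String) : Option String :=
  match possible_keys with
  | [] => none
  | key :: rest =>
    match row.lookup key with
    | some v =>
      if v ≠ "" then some (PySem.Str.strip v)
      else
        match pyAInner row (PySem.Str.lower key) with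
        | some r => some r
        | none => get_csv_value_py row rest
    | none =>
      match pyAInner row (PySem.Str.lower key) with
      | some r => some r
      | none => get_csv_value_py row rest

-- ===== PORT B =====
-- 'for i, key in enumerate(possible_keys): exact_pos.setdefault(key, 2*i); ci_pos.setdefault(key.lower(), 2*i+1)'
def pyBuildPos (keys : List String) : PySem.Dict String Int × PySem.Dict String Int :=
  (PySem.List.enumerate keys).foldl
    (fun st p => (st.1.setdefault p.2 (2 * p.1), st.2.setdefault (PySem.Str.lower p.2) (2 * p.1 + 1)))
    (PySem.Dict.empty, PySem.Dict.empty)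

-- 'p = exact_pos.get(k); q = ci_pos.get(k.lower()); cand = …'
def pyBCand (epos cpos : PySem.Dict String Int) (k : String) : Option Int :=
  match epos.get? k, cpos.get? (PySem.Str.lower k) with
  | none, q => q
  | some p, none => some p
  | some p, some q => if p < q then some p else some q

-- loop body of 'for k, v in row.items(): …'
def pyBStep (epos cpos : PySem.Dict String Int) (best : Option (Int × String))
    (kv : String × String) : Option (Int × String) :=
  if kv.2 = "" then best
  else
    match pyBCand epos cpos kv.1 with
    | none => best
    | some c =>
      match best with
      | none => some (c, PySem.Str.strip kv.2)
      | some b => if c < b.1 then some (c, PySem.Str.strip kv.2) else some b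

def get_csv_value_py_alt (row : List (String × String)) (possible_keys : List String) : Option String :=
  (row.foldl (pyBStep (pyBuildPos possible_keys).1 (pyBuildPos possible_keys).2) none).map Prod.snd

-- ===== PRECONDITION & SPEC =====
-- Pre_ excludes assoc lists with duplicate keys: they do not represent any Python dict
-- (A's argument is a dict), so A's first-match dict-lookup value there is accidental.
def Pre_get_csv_value_py (row : List (String × String)) (possible_keys : List String) : Prop :=
  (row.map Prod.fst).Nodup
instance (row : List (String × String)) (possible_keys : List String) : Decidable (Pre_get_csv_value_py row possible_keys) := by unfold Pre_get_csv_value_py; infer_instance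

def pvWitness_get_csv_value_py : (List (String × String)) × List String :=
  ([("Name", " Ada "), ("age", "36")], ["Age", "name"])

def Spec_get_csv_value_py (row : List (String × String)) (possible_keys : List String) (out : Option String) : Prop := out = get_csv_value_py_alt row possible_keys
instance (row : List (String × String)) (possible_keys : List String) (out : Option String) : Decidable (Spec_get_csv_value_py row possible_keys out) := by unfold Spec_get_csv_value_py; infer_instance

-- ===== CLAIM (what is proved, stated in full; the proofs are below) =====
def Claim_equal_get_csv_value_py : Prop := ∀ (row : List (String × String)) (possible_keys : List String), Dom_get_csv_value_py row possible_keys → Pre_get_csv_value_py row possible_keys → Spec_get_csv_value_py row possible_keys (get_csv_value_py row possible_keys)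

-- ===== LEMMAS AND PROOFS =====

-- exact-match priority table as a function: ePx keys k i = 2*(i + first index of k), if any
def ePx : List String → String → Int → Option Int
  | [], _, _ => none
  | a :: t, k, i => if a = k then some (2 * i) else ePx t k (i + 1)

-- case-insensitive priority table: cPx keys s i = 2*(i + first index with lower = s) + 1
def cPx : List String → String → Int → Option Int
  | [], _, _ => none
  | a :: t, s, i => if PySem.Str.lower a = s then some (2 * i + 1) else cPx t s (i + 1)

def candM (keys : List String) (k : String) : Option Int :=
  match ePx keys k 0, cPx keys (PySem.Str.lower k) 0 with
  | none, q => q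
  | some p, none => some p
  | some p, some q => if p < q then some p else some q

def cnd (c : String → Option Int) (kv : String × String) : Option (Int × String) :=
  if kv.2 = "" then none else (c kv.1).map (fun p => (p, PySem.Str.strip kv.2))

def comb : Option (Int × String) → Option (Int × String) → Option (Int × String)
  | none, m => m
  | some b, none => some b
  | some b, some m => if m.1 < b.1 then some m else some b

def rm (c : String → Option Int) : List (String × String) → Option (Int × String)
  | [] => none
  | kv :: t => comb (cnd c kv) (rm c t)

def shiftP (b : Int × String) : Int × String := (b.1 + 2, b.2)

def midExpr (key : String) (rest : List String) (row : List (String × String)) : Option (Int × String) :=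
  match pyAInner row (PySem.Str.lower key) with
  | some r => some (1, r)
  | none => (rm (candM rest) row).map shiftP

theorem step_eq (epos cpos : PySem.Dict String Int) (b : Option (Int × String)) (kv : String × String) :
    pyBStep epos cpos b kv = comb b (cnd (pyBCand epos cpos) kv) := by
  unfold pyBStep cnd
  by_cases hv : kv.2 = ""
  · simp [hv]; cases b <;> simp [comb]
  · simp only [hv, if_neg, ite_false]
    cases h : pyBCand epos cpos kv.1 <;> cases b <;> simp [comb, h]

theorem comb_assoc (a x y : Option (Int × String)) : comb (comb a x) y = comb a (comb x y) := by
  rcases a with _ | a <;> rcases x with _ | x <;> rcases y with _ | y <;>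
    simp [comb] <;> split_ifs <;> simp [comb] <;> split_ifs <;> first | rfl | omega

theorem foldl_comb (c : String → Option Int) (l : List (String × String)) (b : Option (Int × String)) :
    l.foldl (fun b kv => comb b (cnd c kv)) b = comb b (rm c l) := by
  induction l generalizing b with
  | nil => cases b <;> simp [rm, comb]
  | cons kv t ih => simp only [List.foldl_cons, rm, ih, comb_assoc]

theorem buildPos_get (keys : List String) (e c : PySem.Dict String Int) (i : Int) (q s : String) :
    (((PySem.List.enumerate keys i).foldl
        (fun st p => (st.1.setdefault p.2 (2 * p.1), st.2.setdefault (PySem.Str.lower p.2) (2 * p.1 + 1)))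
        (e, c)).1.get? q = (e.get? q).or (ePx keys q i)) ∧
    (((PySem.List.enumerate keys i).foldl
        (fun st p => (st.1.setdefault p.2 (2 * p.1), st.2.setdefault (PySem.Str.lower p.2) (2 * p.1 + 1)))
        (e, c)).2.get? s = (c.get? s).or (cPx keys s i)) := by
  induction keys generalizing e c i with
  | nil => simp [PySem.List.enumerate_nil, ePx, cPx]
  | cons a t ih =>
    rw [PySem.List.enumerate_cons]
    simp only [List.foldl_cons]
    refine ⟨((ih _ _ _).1).trans ?_, ((ih _ _ _).2).trans ?_⟩
    · by_cases hq : a = q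
      · subst hq
        rw [PySem.Dict.get?_setdefault_self]
        simp only [ePx, if_pos rfl]
        cases h : e.get? a <;> simp [h]
      · rw [PySem.Dict.get?_setdefault_of_ne e (2 * i) (Ne.symm hq)]
        simp [ePx, hq]
    · by_cases hs : PySem.Str.lower a = s
      · subst hs
        rw [PySem.Dict.get?_setdefault_self]
        simp only [cPx, if_pos rfl]
        cases h : c.get? (PySem.Str.lower a) <;> simp [h]
      · rw [PySem.Dict.get?_setdefault_of_ne c (2 * i + 1) (Ne.symm hs)]
        simp [cPx, hs]

theorem pyBCand_eq (keys : List String) :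
    pyBCand (pyBuildPos keys).1 (pyBuildPos keys).2 = candM keys := by
  funext k
  unfold pyBCand candM pyBuildPos
  rw [(buildPos_get keys PySem.Dict.empty PySem.Dict.empty 0 k (PySem.Str.lower k)).1,
      (buildPos_get keys PySem.Dict.empty PySem.Dict.empty 0 k (PySem.Str.lower k)).2]
  simp [PySem.Dict.get?, PySem.Dict.empty]

theorem ePx_shift (keys : List String) (q : String) (i : Int) :
    ePx keys q (i + 1) = (ePx keys q i).map (· + 2) := by
  induction keys generalizing i with
  | nil => simp [ePx]
  | cons a t ih =>
    by_cases h : a = q <;> simp [ePx, h, ih] <;> ring_nf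

theorem cPx_shift (keys : List String) (s : String) (i : Int) :
    cPx keys s (i + 1) = (cPx keys s i).map (· + 2) := by
  induction keys generalizing i with
  | nil => simp [cPx]
  | cons a t ih =>
    by_cases h : PySem.Str.lower a = s <;> simp [cPx, h, ih] <;> ring_nf

theorem ePx_lb (keys : List String) (q : String) (i p : Int) (h : ePx keys q i = some p) : 2 * i ≤ p := by
  induction keys generalizing i with
  | nil => simp [ePx] at h
  | cons a t ih =>
    by_cases ha : a = q
    · simp [ePx, ha] at h; omega
    · simp only [ePx, if_neg ha] at h
      have := ih (i + 1) h; omega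

theorem cPx_lb (keys : List String) (s : String) (i p : Int) (h : cPx keys s i = some p) : 2 * i + 1 ≤ p := by
  induction keys generalizing i with
  | nil => simp [cPx] at h
  | cons a t ih =>
    by_cases ha : PySem.Str.lower a = s
    · simp [cPx, ha] at h; omega
    · simp only [cPx, if_neg ha] at h
      have := ih (i + 1) h; omega

theorem candM_lb (keys : List String) (k : String) (p : Int) (h : candM keys k = some p) : 0 ≤ p := by
  unfold candM at h
  rcases he : ePx keys k 0 with _ | pe <;> rcases hc : cPx keys (PySem.Str.lower k) 0 with _ | pc <;>
    rw [he, hc] at h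
  · cases h
  · have h' : some pc = some p := h
    injection h' with h''
    have := cPx_lb keys _ 0 pc hc; omega
  · have h' : some pe = some p := h
    injection h' with h''
    have := ePx_lb keys k 0 pe he; omega
  · have h1 := ePx_lb keys k 0 pe he
    have h2 := cPx_lb keys _ 0 pc hc
    have h' : (if pe < pc then some pe else some pc) = some p := h
    split_ifs at h' <;> injection h' with h'' <;> omega

theorem candM_exact (key : String) (rest : List String) (k : String) (hk : k = key) :
    candM (key :: rest) k = some 0 := by
  subst hk
  unfold candM
  rw [show ePx (k :: rest) k 0 = some 0 by simp [ePx]]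
  rw [show cPx (k :: rest) (PySem.Str.lower k) 0 = some 1 by simp [cPx]]
  norm_num

theorem candM_ci (key : String) (rest : List String) (k : String) (hk : k ≠ key)
    (hl : PySem.Str.lower k = PySem.Str.lower key) : candM (key :: rest) k = some 1 := by
  unfold candM
  rw [show ePx (key :: rest) k 0 = ePx rest k 1 from if_neg (Ne.symm hk)]
  rw [show cPx (key :: rest) (PySem.Str.lower k) 0 = some 1 by simp [cPx, hl.symm]]
  rw [show ePx rest k 1 = (ePx rest k 0).map (· + 2) from by simpa using ePx_shift rest k 0]
  rcases he : ePx rest k 0 with _ | pe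
  · rfl
  · have := ePx_lb rest k 0 pe he
    simp only [Option.map_some]
    rw [if_neg (by omega)]

theorem candM_other (key : String) (rest : List String) (k : String)
    (hl : PySem.Str.lower k ≠ PySem.Str.lower key) :
    candM (key :: rest) k = (candM rest k).map (· + 2) := by
  have hk : k ≠ key := fun h => hl (by rw [h])
  unfold candM
  rw [show ePx (key :: rest) k 0 = ePx rest k 1 from if_neg (Ne.symm hk)]
  rw [show cPx (key :: rest) (PySem.Str.lower k) 0 = cPx rest (PySem.Str.lower k) 1 from
    if_neg (Ne.symm hl)]
  rw [show ePx rest k 1 = (ePx rest k 0).map (· + 2) from by simpa using ePx_shift rest k 0]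
  rw [show cPx rest (PySem.Str.lower k) 1 = (cPx rest (PySem.Str.lower k) 0).map (· + 2) from by
    simpa using cPx_shift rest (PySem.Str.lower k) 0]
  rcases ePx rest k 0 with _ | pe <;> rcases cPx rest (PySem.Str.lower k) 0 with _ | pc <;> simp
  by_cases h : pe < pc
  · rw [if_pos h, if_pos (by omega)]
    rfl
  · rw [if_neg h, if_neg (by omega)]
    rfl

theorem rm_none (c : String → Option Int) (row : List (String × String))
    (h : ∀ k, c k = none) : rm c row = none := by
  induction row with
  | nil => rfl
  | cons kv t ih => simp [rm, cnd, h, ih, comb]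

theorem cnd_lb {c : String → Option Int} {L : Int} (hc : ∀ k p, c k = some p → L ≤ p)
    {kv : String × String} {x : Int × String} (h : cnd c kv = some x) : L ≤ x.1 := by
  unfold cnd at h
  by_cases hv : kv.2 = ""
  · rw [if_pos hv] at h; cases h
  · rw [if_neg hv] at h
    rcases hcc : c kv.1 with _ | p <;> rw [hcc] at h
    · cases h
    · simp only [Option.map_some] at h
      cases h
      simpa using hc _ p hcc

theorem rm_lb (c : String → Option Int) (L : Int) (hc : ∀ k p, c k = some p → L ≤ p)
    (row : List (String × String)) (b : Int × String) (h : rm c row = some b) : L ≤ b.1 := by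
  induction row generalizing b with
  | nil => cases h
  | cons kv t ih =>
    simp only [rm] at h
    rcases hh : cnd c kv with _ | x <;> rw [hh] at h
    · exact ih b h
    · have hx := cnd_lb hc hh
      rcases ht : rm c t with _ | m <;> rw [ht] at h
      · cases h; exact hx
      · have hm := ih m ht
        simp only [comb] at h
        split_ifs at h <;> cases h
        · exact hm
        · exact hx

theorem midExpr_lb (key : String) (rest : List String) (row : List (String × String))
    (b : Int × String) (h : midExpr key rest row = some b) : 1 ≤ b.1 := by
  unfold midExpr at h
  rcases ha : pyAInner row (PySem.Str.lower key) with _ | r <;> rw [ha] at h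
  · rcases hr : rm (candM rest) row with _ | m <;> rw [hr] at h
    · cases h
    · simp only [Option.map_some] at h
      cases h
      have := rm_lb (candM rest) 0 (fun k p => candM_lb rest k p) row m hr
      simp only [shiftP]; omega
  · cases h; norm_num

theorem comb_shift (a m : Option (Int × String)) :
    comb (a.map shiftP) (m.map shiftP) = (comb a m).map shiftP := by
  rcases a with _ | a
  · rfl
  · rcases m with _ | m
    · rfl
    · simp only [Option.map_some]
      show comb (some (shiftP a)) (some (shiftP m)) = (comb (some a) (some m)).map shiftP
      simp only [comb]
      by_cases h : m.1 < a.1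
      · rw [if_pos (show (shiftP m).1 < (shiftP a).1 from by simp only [shiftP]; omega), if_pos h]
        rfl
      · rw [if_neg (show ¬(shiftP m).1 < (shiftP a).1 from by simp only [shiftP]; omega), if_neg h]
        rfl

theorem comb_keep_left (x : Int × String) (m : Option (Int × String))
    (h : ∀ b, m = some b → x.1 ≤ b.1) : comb (some x) m = some x := by
  rcases m with _ | b
  · rfl
  · simp only [comb]
    rw [if_neg (not_lt.2 (h b rfl))]

theorem comb_keep_right (h : Option (Int × String)) (b : Int × String)
    (hlt : ∀ x, h = some x → b.1 < x.1) : comb h (some b) = some b := by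
  rcases h with _ | x
  · rfl
  · simp only [comb]
    rw [if_pos (hlt x rfl)]

theorem lookup_none {l : List (String × String)} {k : String}
    (h : k ∉ l.map Prod.fst) : l.lookup k = none := by
  induction l with
  | nil => rfl
  | cons kv t ih =>
    simp only [List.map_cons, List.mem_cons] at h
    push_neg at h
    simp [List.lookup, beq_eq_false_iff_ne.2 h.1, ih h.2]

theorem rm_main (key : String) (rest : List String) (row : List (String × String))
    (hnd : (row.map Prod.fst).Nodup) :
    rm (candM (key :: rest)) row =
      match row.lookup key with
      | some v => if v ≠ "" then some ((0 : Int), PySem.Str.strip v) else midExpr key rest row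
      | none => midExpr key rest row := by
  induction row with
  | nil => simp [rm, midExpr, pyAInner, List.lookup]
  | cons kv t ih =>
    obtain ⟨k, v⟩ := kv
    simp only [List.map_cons, List.nodup_cons] at hnd
    obtain ⟨hkt, hndt⟩ := hnd
    have iht := ih hndt
    by_cases hk : k = key
    · subst hk
      have hlt : t.lookup k = none := lookup_none hkt
      by_cases hv : v = ""
      · subst hv
        have h1 : rm (candM (k :: rest)) ((k, "") :: t) = rm (candM (k :: rest)) t := by
          simp [rm, cnd, comb]
        have h2 : midExpr k rest ((k, "") :: t) = midExpr k rest t := by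
          unfold midExpr
          simp [pyAInner, rm, cnd, comb]
        rw [h1, h2, iht, hlt]
        simp [List.lookup]
      · have hc : cnd (candM (k :: rest)) (k, v) = some (0, PySem.Str.strip v) := by
          simp [cnd, hv, candM_exact k rest k rfl]
        simp only [rm, hc]
        rw [comb_keep_left _ _ (fun b hb => rm_lb _ 0 (fun k' p => candM_lb _ k' p) t b hb)]
        simp [List.lookup, hv]
    · have hbk : (key == k) = false := beq_eq_false_iff_ne.2 (fun h => hk h.symm)
      have hlk : ((k, v) :: t).lookup key = t.lookup key := by simp [List.lookup, hbk]
      by_cases hl : PySem.Str.lower k = PySem.Str.lower key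
      · by_cases hv : v = ""
        · subst hv
          have h1 : rm (candM (key :: rest)) ((k, "") :: t) = rm (candM (key :: rest)) t := by
            simp [rm, cnd, comb]
          have h2 : midExpr key rest ((k, "") :: t) = midExpr key rest t := by
            unfold midExpr
            simp [pyAInner, rm, cnd, comb]
          rw [h1, h2, iht, hlk]
        · have hc : cnd (candM (key :: rest)) (k, v) = some (1, PySem.Str.strip v) := by
            simp [cnd, hv, candM_ci key rest k hk hl]
          have hm : midExpr key rest ((k, v) :: t) = some (1, PySem.Str.strip v) := by
            unfold midExpr
            simp [pyAInner, hl, hv]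
          simp only [rm, hc, hlk, hm, iht]
          rcases hlt : t.lookup key with _ | w
          · simp only
            exact comb_keep_left _ _ (fun b hb => midExpr_lb key rest t b hb)
          · by_cases hw : w = ""
            · subst hw
              simp only [ne_eq, not_true_eq_false, ite_false]
              exact comb_keep_left _ _ (fun b hb => midExpr_lb key rest t b hb)
            · simp only [ne_eq, hw, not_false_eq_true, ite_true]
              exact comb_keep_right _ _ (fun x hx => by cases hx; norm_num)
      · -- head has no exact or case-insensitive match for key: its candidate is rest's, shifted
        have hcs : cnd (candM (key :: rest)) (k, v) = (cnd (candM rest) (k, v)).map shiftP := by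
          unfold cnd
          split_ifs
          · rfl
          · rw [show candM (key :: rest) (k, v).1 = (candM rest (k, v).1).map (· + 2) from
              candM_other key rest k hl]
            cases candM rest (k, v).1 <;> rfl
        have hb2 : ∀ b, cnd (candM (key :: rest)) (k, v) = some b → 2 ≤ b.1 := by
          intro b hb
          rw [hcs] at hb
          rcases hcr : cnd (candM rest) (k, v) with _ | x <;> rw [hcr] at hb
          · cases hb
          · simp only [Option.map_some] at hb
            cases hb
            have := cnd_lb (fun k' p => candM_lb rest k' p) hcr
            simp only [shiftP]; omega
        have hai : pyAInner ((k, v) :: t) (PySem.Str.lower key) = pyAInner t (PySem.Str.lower key) := by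
          simp [pyAInner, hl]
        simp only [rm, hlk, iht]
        rcases hlt : t.lookup key with _ | w
        · simp only
          rcases hmt : pyAInner t (PySem.Str.lower key) with _ | r
          · -- both sides are the shifted rest result
            unfold midExpr
            rw [hai, hmt]
            show comb (cnd (candM (key :: rest)) (k, v)) ((rm (candM rest) t).map shiftP)
              = (comb (cnd (candM rest) (k, v)) (rm (candM rest) t)).map shiftP
            rw [hcs, comb_shift]
          · have hm2 : midExpr key rest ((k, v) :: t) = some (1, r) := by
              unfold midExpr; rw [hai, hmt]
            have hm1 : midExpr key rest t = some (1, r) := by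
              unfold midExpr; rw [hmt]
            rw [hm1, hm2]
            exact comb_keep_right _ _ (fun x hx => by have := hb2 x hx; norm_num; omega)
        · by_cases hw : w = ""
          · subst hw
            simp only [ne_eq, not_true_eq_false, ite_false]
            rcases hmt : pyAInner t (PySem.Str.lower key) with _ | r
            · unfold midExpr
              rw [hai, hmt]
              show comb (cnd (candM (key :: rest)) (k, v)) ((rm (candM rest) t).map shiftP)
                = (comb (cnd (candM rest) (k, v)) (rm (candM rest) t)).map shiftP
              rw [hcs, comb_shift]
            · have hm2 : midExpr key rest ((k, v) :: t) = some (1, r) := by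
                unfold midExpr; rw [hai, hmt]
              have hm1 : midExpr key rest t = some (1, r) := by
                unfold midExpr; rw [hmt]
              rw [hm1, hm2]
              exact comb_keep_right _ _ (fun x hx => by have := hb2 x hx; norm_num; omega)
          · simp only [ne_eq, hw, not_false_eq_true, ite_true]
            exact comb_keep_right _ _ (fun x hx => by have := hb2 x hx; norm_num; omega)

theorem candM_nil (k : String) : candM [] k = none := by
  simp [candM, ePx, cPx]

theorem rm_eq_A (keys : List String) (row : List (String × String))
    (hnd : (row.map Prod.fst).Nodup) :
    (rm (candM keys) row).map Prod.snd = get_csv_value_py row keys := by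
  induction keys with
  | nil =>
    rw [rm_none _ _ candM_nil]
    rfl
  | cons key rest ih =>
    rw [rm_main key rest row hnd]
    unfold get_csv_value_py
    rcases hl : row.lookup key with _ | v
    · unfold midExpr
      rcases ha : pyAInner row (PySem.Str.lower key) with _ | r
      · rw [← ih]
        rcases rm (candM rest) row with _ | b <;> simp [shiftP]
      · simp
    · by_cases hv : v = ""
      · subst hv
        simp only [ne_eq, not_true_eq_false, ite_false]
        unfold midExpr
        rcases ha : pyAInner row (PySem.Str.lower key) with _ | r
        · rw [← ih]
          rcases rm (candM rest) row with _ | b <;> simp [shiftP]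
        · simp
      · simp [hv]

theorem alt_eq_rm (row : List (String × String)) (keys : List String) :
    get_csv_value_py_alt row keys = (rm (candM keys) row).map Prod.snd := by
  unfold get_csv_value_py_alt
  have h1 : pyBStep (pyBuildPos keys).1 (pyBuildPos keys).2
      = fun b kv => comb b (cnd (candM keys) kv) := by
    funext b kv
    rw [step_eq, pyBCand_eq]
  rw [h1, foldl_comb]
  rfl

-- ===== VERDICT (by name: the statement is the Claim_ definition above) =====
theorem get_csv_value_py_spec : Claim_equal_get_csv_value_py := by
  intro row keys _ hpre
  unfold Spec_get_csv_value_py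
  rw [alt_eq_rm, rm_eq_A keys row hpre]
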